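-- pv_equiv track=rewrite | github.com/hsuvas/return_quest | Untitled/app.py | get_persona_sprite_key
-- ===== SOURCE A (Python) =====
-- def get_persona_sprite_key(persona):
--     """Map persona attributes to a sprite key."""
--     age = persona.get("Age-range", "30-35")
--     sector = persona.get("Job Sector", "")
--     gender = persona.get("Gender", "")
--     is_female = "female" in gender.lower() or "woman" in gender.lower()
--     suffix = "_f" if is_female else "_m"
--
--     young = any(x in age for x in ["18", "20", "22", "25"])
--     creative = any(s in sector for s in ["Art", "Media", "Music", "Design", "Film"])
--     academic = any(s in sector for s in ["Academia", "Education", "Research", "Science"])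
--     professional = any(s in sector for s in ["Tech", "Finance", "Law", "Engineer", "Business"])
--
--     if young:
--         return f"youth{suffix}"
--     if creative:
--         return f"creative{suffix}"
--     if academic:
--         return f"academic{suffix}"
--     if professional:
--         return f"professional{suffix}"
--     return f"default{suffix}"
-- ===== SOURCE B (Python) =====
-- def get_persona_sprite_key(persona):
--     """Map persona attributes to a sprite key.
--
--     Flat keyword->priority map; the answer is the MINIMUM priority among all
--     matched keywords (age keywords carry priority 0, sector keywords 1-3),
--     indexing a prefix table; 4 (no match) indexes 'default'.
--     """
--     KEYWORD_PRIORITY = {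
--         "18": 0, "20": 0, "22": 0, "25": 0,
--         "Art": 1, "Media": 1, "Music": 1, "Design": 1, "Film": 1,
--         "Academia": 2, "Education": 2, "Research": 2, "Science": 2,
--         "Tech": 3, "Finance": 3, "Law": 3, "Engineer": 3, "Business": 3,
--     }
--     PREFIXES = ["youth", "creative", "academic", "professional", "default"]
--     age = persona.get("Age-range", "30-35")
--     sector = persona.get("Job Sector", "")
--     gender = persona.get("Gender", "").lower()
--     suffix = "_f" if ("female" in gender or "woman" in gender) else "_m"
--     best = 4
--     for kw, pr in KEYWORD_PRIORITY.items():
--         if pr < best and kw in (age if pr == 0 else sector):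
--             best = pr
--     return PREFIXES[best] + suffix
-- ===== Notes on version B (the rewrite author's own statement) =====
-- stated objective: alternative
-- what changed: Replaces A's four eagerly-computed any() flags and the unrolled if-chain with a flat keyword->priority dictionary folded once to the minimum matched priority, which indexes a prefix table ('youth'..'default'); correct because A's first-matching category is exactly the minimum priority among all matched keywords.
import Mathlib
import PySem

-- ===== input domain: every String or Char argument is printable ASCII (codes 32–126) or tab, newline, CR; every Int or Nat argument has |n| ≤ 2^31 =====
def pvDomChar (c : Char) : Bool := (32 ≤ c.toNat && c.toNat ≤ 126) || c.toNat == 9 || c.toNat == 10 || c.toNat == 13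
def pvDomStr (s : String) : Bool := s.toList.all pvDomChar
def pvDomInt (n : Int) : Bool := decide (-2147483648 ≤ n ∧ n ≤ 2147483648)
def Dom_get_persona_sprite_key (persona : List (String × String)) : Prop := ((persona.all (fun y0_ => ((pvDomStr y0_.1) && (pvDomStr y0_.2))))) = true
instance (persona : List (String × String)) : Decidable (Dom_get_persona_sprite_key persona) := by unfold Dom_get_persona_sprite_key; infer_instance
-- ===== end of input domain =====

-- B replaces A's four any()-flags and if-chain by a minimum over a flat keyword→priority map (objective: alternative decomposition).

-- ===== PORT A =====
def get_persona_sprite_key (persona : List (String × String)) : String :=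
  let d := PySem.Dict.ofList persona
  let age := d.getD "Age-range" "30-35"
  let sector := d.getD "Job Sector" ""
  let gender := d.getD "Gender" ""
  let is_female := PySem.Str.isIn "female" (PySem.Str.lower gender) || PySem.Str.isIn "woman" (PySem.Str.lower gender)
  let suffix := if is_female then "_f" else "_m"
  let young := ["18", "20", "22", "25"].any (fun x => PySem.Str.isIn x age)
  let creative := ["Art", "Media", "Music", "Design", "Film"].any (fun s => PySem.Str.isIn s sector)
  let academic := ["Academia", "Education", "Research", "Science"].any (fun s => PySem.Str.isIn s sector)
  let professional := ["Tech", "Finance", "Law", "Engineer", "Business"].any (fun s => PySem.Str.isIn s sector)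
  if young then "youth" ++ suffix
  else if creative then "creative" ++ suffix
  else if academic then "academic" ++ suffix
  else if professional then "professional" ++ suffix
  else "default" ++ suffix

-- ===== PORT B =====
-- flat keyword→priority map (a Python dict literal with distinct keys, iterated in insertion order)
def spriteKeywordPriority : List (String × Nat) :=
  [("18", 0), ("20", 0), ("22", 0), ("25", 0),
   ("Art", 1), ("Media", 1), ("Music", 1), ("Design", 1), ("Film", 1),
   ("Academia", 2), ("Education", 2), ("Research", 2), ("Science", 2),
   ("Tech", 3), ("Finance", 3), ("Law", 3), ("Engineer", 3), ("Business", 3)]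

def spritePrefixes : List String := ["youth", "creative", "academic", "professional", "default"]

def get_persona_sprite_key_alt (persona : List (String × String)) : String :=
  let d := PySem.Dict.ofList persona
  let age := d.getD "Age-range" "30-35"
  let sector := d.getD "Job Sector" ""
  let gender := PySem.Str.lower (d.getD "Gender" "")
  let suffix := if PySem.Str.isIn "female" gender || PySem.Str.isIn "woman" gender then "_f" else "_m"
  let best := spriteKeywordPriority.foldl
      (fun best kp =>
        if kp.2 < best ∧ PySem.Str.isIn kp.1 (if kp.2 == 0 then age else sector) = true then kp.2 else best) 4
  spritePrefixes.getD best "default" ++ suffix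

-- ===== PRECONDITION & SPEC =====
def Spec_get_persona_sprite_key (persona : List (String × String)) (out : String) : Prop := out = get_persona_sprite_key_alt persona
instance (persona : List (String × String)) (out : String) : Decidable (Spec_get_persona_sprite_key persona out) := by unfold Spec_get_persona_sprite_key; infer_instance

-- ===== CLAIM (what is proved, stated in full; the proofs are below) =====
def Claim_equal_get_persona_sprite_key : Prop := ∀ (persona : List (String × String)), Dom_get_persona_sprite_key persona → Spec_get_persona_sprite_key persona (get_persona_sprite_key persona)

-- ===== LEMMAS AND PROOFS =====

-- folding one constant-priority segment of the map updates the running minimum iff the segment matches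
theorem sprite_foldl_seg (p : Nat) (age sector : String) (ks : List String) (best : Nat) :
    (ks.map (fun k => (k, p))).foldl
      (fun best kp =>
        if kp.2 < best ∧ PySem.Str.isIn kp.1 (if kp.2 == 0 then age else sector) = true then kp.2 else best) best
    = if p < best ∧ ks.any (fun k => PySem.Str.isIn k (if p == 0 then age else sector)) = true then p else best := by
  induction ks generalizing best with
  | nil => simp
  | cons k ks ih =>
    simp only [List.map_cons, List.foldl_cons]
    by_cases hm : PySem.Str.isIn k (if p == 0 then age else sector) = true
    · by_cases hp : p < best
      · rw [if_pos ⟨hp, hm⟩, ih p, ite_self,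
          if_pos ⟨hp, by simp only [List.any_cons, Bool.or_eq_true]; exact Or.inl hm⟩]
      · rw [if_neg (fun h => hp h.1), ih best, if_neg (fun h => hp h.1), if_neg (fun h => hp h.1)]
    · have hm' : PySem.Str.isIn k (if p == 0 then age else sector) = false :=
        Bool.eq_false_iff.mpr hm
      rw [if_neg (fun h => hm h.2), ih best]
      simp only [List.any_cons, hm', Bool.false_or]

-- A's four any()-flags characterise B's minimum-priority fold
theorem sprite_best_eq (age sector : String) :
    spriteKeywordPriority.foldl
      (fun best kp =>
        if kp.2 < best ∧ PySem.Str.isIn kp.1 (if kp.2 == 0 then age else sector) = true then kp.2 else best) 4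
    = if ["18", "20", "22", "25"].any (fun x => PySem.Str.isIn x age) then 0
      else if ["Art", "Media", "Music", "Design", "Film"].any (fun s => PySem.Str.isIn s sector) then 1
      else if ["Academia", "Education", "Research", "Science"].any (fun s => PySem.Str.isIn s sector) then 2
      else if ["Tech", "Finance", "Law", "Engineer", "Business"].any (fun s => PySem.Str.isIn s sector) then 3
      else 4 := by
  have h : spriteKeywordPriority =
      (["18", "20", "22", "25"].map (fun k => (k, (0 : Nat))))
      ++ (["Art", "Media", "Music", "Design", "Film"].map (fun k => (k, (1 : Nat))))
      ++ (["Academia", "Education", "Research", "Science"].map (fun k => (k, (2 : Nat))))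
      ++ (["Tech", "Finance", "Law", "Engineer", "Business"].map (fun k => (k, (3 : Nat)))) := rfl
  have e0 : (if ((0 : Nat) == 0) = true then age else sector) = age := rfl
  have e1 : (if ((1 : Nat) == 0) = true then age else sector) = sector := rfl
  have e2 : (if ((2 : Nat) == 0) = true then age else sector) = sector := rfl
  have e3 : (if ((3 : Nat) == 0) = true then age else sector) = sector := rfl
  rw [h, List.foldl_append, List.foldl_append, List.foldl_append,
    sprite_foldl_seg, sprite_foldl_seg, sprite_foldl_seg, sprite_foldl_seg]
  simp only [e0, e1, e2, e3]
  by_cases hY : (["18", "20", "22", "25"].any (fun x => PySem.Str.isIn x age)) = true <;>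
    by_cases hC : (["Art", "Media", "Music", "Design", "Film"].any (fun s => PySem.Str.isIn s sector)) = true <;>
      by_cases hA : (["Academia", "Education", "Research", "Science"].any (fun s => PySem.Str.isIn s sector)) = true <;>
        by_cases hP : (["Tech", "Finance", "Law", "Engineer", "Business"].any (fun s => PySem.Str.isIn s sector)) = true <;>
          · simp only [hY, hC, hA, hP]
            norm_num

-- ===== VERDICT (by name: the statement is the Claim_ definition above) =====
theorem get_persona_sprite_key_spec : Claim_equal_get_persona_sprite_key := by
  intro persona _
  unfold Spec_get_persona_sprite_key get_persona_sprite_key get_persona_sprite_key_alt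
  simp only []
  rw [sprite_best_eq]
  split_ifs <;> rfl
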